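-- pv_equiv track=rewrite | github.com/shubiduba1212/Coding_Basic | 프로그래머스/0/120834. 외계행성의 나이/외계행성의 나이.py | solution
-- ===== SOURCE A (Python) =====
-- def solution(age):
--     answer = ''
--     tempStr = str(age)
--     arr = ['a','b','c','d','e','f','g','h','i','j']
--
--     for i in range(len(tempStr)) :
--         for j in range(len(arr)) :
--             if int(tempStr[i:i+1]) == j :
--                 answer += arr[j]
--
--     return answer
-- ===== SOURCE B (Python) =====
-- def solution(age):
--     return ''.join(chr(ord('a') + int(d)) for d in str(age))
-- ===== Notes on version B (the rewrite author's own statement) =====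
-- stated objective: idiomatic
-- what changed: Drops the letter table and the inner search loop over it; computes each output letter directly by arithmetic on the digit (chr(ord('a')+int(d))) in a single pass over str(age).
import Mathlib
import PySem

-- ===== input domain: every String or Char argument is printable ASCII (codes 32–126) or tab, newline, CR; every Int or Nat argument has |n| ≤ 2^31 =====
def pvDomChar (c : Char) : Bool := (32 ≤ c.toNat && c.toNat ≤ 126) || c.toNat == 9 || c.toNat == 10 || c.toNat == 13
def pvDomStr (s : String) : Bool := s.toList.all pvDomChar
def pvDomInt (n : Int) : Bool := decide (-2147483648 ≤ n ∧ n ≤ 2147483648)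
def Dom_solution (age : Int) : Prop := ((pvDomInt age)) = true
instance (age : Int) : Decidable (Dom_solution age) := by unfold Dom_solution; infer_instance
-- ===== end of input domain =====

-- B replaces A's letter table and inner search loop by direct per-digit arithmetic in one pass.

-- ===== PORT A =====
-- arr[j] is ported as pyGet? …|>.toList; j ranges over range(len(arr)), so it is always in range.
def solution (age : Int) : String :=
  let tempStr := PySem.Int.toChars age
  let arr : List Char := ['a','b','c','d','e','f','g','h','i','j']
  let answer := (PySem.List.pyRange 0 (tempStr.length : Int) 1).foldl (fun answer i =>
      (PySem.List.pyRange 0 (arr.length : Int) 1).foldl (fun answer j =>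
        if PySem.Int.ofChars? (PySem.List.slice tempStr (some i) (some (i + 1))) = some j then
          answer ++ (PySem.List.pyGet? arr j).toList
        else answer) answer) ([] : List Char)
  String.mk answer

-- ===== PORT B =====
-- int(d) is ported as (ofChars? [d]).getD 0; under Pre_ every d is a digit, so the default is unreachable.
def solution_alt (age : Int) : String :=
  String.mk ((PySem.Int.toChars age).map (fun d =>
    Char.ofNat ('a'.toNat + ((PySem.Int.ofChars? [d]).getD 0).toNat)))

-- ===== PRECONDITION & SPEC =====
-- Pre_ excludes negative ages, on which Python A raises ValueError at int('-') (B raises there too).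
def Pre_solution (age : Int) : Prop := 0 ≤ age
instance (age : Int) : Decidable (Pre_solution age) := by unfold Pre_solution; infer_instance
def pvWitness_solution : Int := (23)

def Spec_solution (age : Int) (out : String) : Prop := out = solution_alt age
instance (age : Int) (out : String) : Decidable (Spec_solution age out) := by unfold Spec_solution; infer_instance

-- ===== CLAIM (what is proved, stated in full; the proofs are below) =====
def Claim_equal_solution : Prop := ∀ (age : Int), Dom_solution age → Pre_solution age → Spec_solution age (solution age)

-- ===== LEMMAS AND PROOFS =====

-- every char produced by Nat.toDigitsCore is a digit char or comes from the accumulator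
lemma toDigitsCore_mem (f : Nat) : ∀ (n : Nat) (acc : List Char) (c : Char),
    c ∈ Nat.toDigitsCore 10 f n acc → (∃ k, k < 10 ∧ c = Nat.digitChar k) ∨ c ∈ acc := by
  induction f with
  | zero => intro n acc c h; exact Or.inr h
  | succ f ih =>
    intro n acc c h
    by_cases hz : n / 10 = 0
    · rw [Nat.toDigitsCore, if_pos hz] at h
      rcases List.mem_cons.mp h with h1 | h1
      · exact Or.inl ⟨n % 10, Nat.mod_lt _ (by omega), h1⟩
      · exact Or.inr h1
    · rw [Nat.toDigitsCore, if_neg hz] at h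
      rcases ih _ _ _ h with h' | h'
      · exact Or.inl h'
      · rcases List.mem_cons.mp h' with h1 | h1
        · exact Or.inl ⟨n % 10, Nat.mod_lt _ (by omega), h1⟩
        · exact Or.inr h1

lemma toDigits_mem (n : Nat) (c : Char) (h : c ∈ Nat.toDigits 10 n) :
    ∃ k, k < 10 ∧ c = Nat.digitChar k := by
  rcases toDigitsCore_mem _ _ _ _ h with h' | h'
  · exact h'
  · simp at h'

lemma ofChars_digitChar (k : Nat) (hk : k < 10) :
    PySem.Int.ofChars? [Nat.digitChar k] = some (k : Int) := by
  interval_cases k <;> decide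

-- A's inner loop over the letter table produces exactly B's arithmetically computed letter
lemma inner_eq (k : Nat) (hk : k < 10) (answer : List Char) :
    (PySem.List.pyRange 0 ((['a','b','c','d','e','f','g','h','i','j'] : List Char).length : Int) 1).foldl
      (fun ans j =>
        if PySem.Int.ofChars? [Nat.digitChar k] = some j then
          ans ++ (PySem.List.pyGet? (['a','b','c','d','e','f','g','h','i','j'] : List Char) j).toList
        else ans) answer
    = answer ++ [Char.ofNat ('a'.toNat + ((PySem.Int.ofChars? [Nat.digitChar k]).getD 0).toNat)] := by
  rw [ofChars_digitChar k hk,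
      show PySem.List.pyRange 0 ((['a','b','c','d','e','f','g','h','i','j'] : List Char).length : Int) 1
            = [0,1,2,3,4,5,6,7,8,9] from by decide]
  interval_cases k <;>
    simp [List.foldl, PySem.List.pyGet?, PySem.List.pyIdx?]

-- A's outer loop over index range + slicing equals B's map, for any all-digit suffix
lemma outer_eq (full : List Char) : ∀ (cs : List Char) (p : Nat) (acc : List Char),
    full.drop p = cs → (∀ c ∈ cs, ∃ k, k < 10 ∧ c = Nat.digitChar k) →
    (PySem.List.pyRange (p : Int) ((p : Int) + (cs.length : Int)) 1).foldl (fun answer i =>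
      (PySem.List.pyRange 0 ((['a','b','c','d','e','f','g','h','i','j'] : List Char).length : Int) 1).foldl
        (fun ans j =>
          if PySem.Int.ofChars? (PySem.List.slice full (some i) (some (i + 1))) = some j then
            ans ++ (PySem.List.pyGet? (['a','b','c','d','e','f','g','h','i','j'] : List Char) j).toList
          else ans) answer) acc
    = acc ++ cs.map (fun d => Char.ofNat ('a'.toNat + ((PySem.Int.ofChars? [d]).getD 0).toNat)) := by
  intro cs
  induction cs with
  | nil =>
    intro p acc _ _
    rw [show PySem.List.pyRange (p : Int) ((p : Int) + (([] : List Char).length : Int)) 1 = []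
        from PySem.List.pyRange_one_eq_nil (by simp only [List.length_nil, Nat.cast_zero, add_zero]; exact le_refl _)]
    simp
  | cons c cs ih =>
    intro p acc hdrop hdig
    rw [show PySem.List.pyRange (p : Int) ((p : Int) + ((c :: cs).length : Int)) 1
          = (p : Int) :: PySem.List.pyRange ((p : Int) + 1) ((p : Int) + ((c :: cs).length : Int)) 1
        from PySem.List.pyRange_one_cons (by simp only [List.length_cons]; push_cast; omega)]
    rw [List.foldl_cons]
    have hslice : PySem.List.slice full (some (p : Int)) (some ((p : Int) + 1)) = [c] := by
      have := PySem.List.slice_natCast_add full p 1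
      rw [show ((1:Nat):Int) = (1:Int) from rfl] at this
      rw [this, hdrop]
      rfl
    rw [hslice]
    obtain ⟨k, hk, hc⟩ := hdig c (by simp)
    rw [hc, inner_eq k hk]
    have hdrop' : full.drop (p + 1) = cs := by
      have : full.drop (p + 1) = (full.drop p).drop 1 := by
        rw [List.drop_drop]
      rw [this, hdrop]; rfl
    have hrec := ih (p + 1) (acc ++ [Char.ofNat ('a'.toNat + ((PySem.Int.ofChars? [Nat.digitChar k]).getD 0).toNat)]) hdrop' (fun c hc => hdig c (by simp [hc]))
    rw [show ((p : Int) + 1) = (((p + 1 : Nat) : Int)) from by push_cast; ring]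
    rw [show (p : Int) + (((Nat.digitChar k :: cs).length : Nat) : Int)
          = ((p + 1 : Nat) : Int) + ((cs.length : Nat) : Int) from by simp; push_cast; ring]
    rw [hrec]
    simp

-- ===== VERDICT (by name: the statement is the Claim_ definition above) =====
theorem solution_spec : Claim_equal_solution := by
  intro age _ hpre
  unfold Spec_solution solution solution_alt
  unfold Pre_solution at hpre
  have hnn : ¬ age < 0 := by omega
  simp only [PySem.Int.toChars, if_neg hnn]
  set cs := Nat.toDigits 10 age.toNat with hcs
  have h := outer_eq cs cs 0 [] (by simp) (fun c hc => toDigits_mem _ _ hc)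
  rw [show ((0:Nat):Int) = (0:Int) from rfl, zero_add] at h
  rw [h]
  simp
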